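-- pv_equiv track=rewrite | github.com/fadlytanjung/coding-interview-js | python/sumFirstTwoDigits.py | sum_first_last_two
-- ===== SOURCE A (Python) =====
-- def sum_first_last_two(n):
--     is_negative = n < 0
--
--     num = -n if is_negative else n
--
--     last_two = num % 100
--
--     first_two = num
--     while first_two >= 100:
--         first_two //= 10
--
--     return first_two + last_two
-- ===== SOURCE B (Python) =====
-- def sum_first_last_two(n):
--     num = -n if n < 0 else n
--     # materialise the little-endian decimal digit list once
--     digits = [num % 10]
--     num //= 10
--     while num > 0:
--         digits.append(num % 10)
--         num //= 10
--     last_two = digits[0] if len(digits) == 1 else 10 * digits[1] + digits[0]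
--     rev = digits[::-1]
--     first_two = rev[0] if len(rev) == 1 else 10 * rev[0] + rev[1]
--     return first_two + last_two
-- ===== Notes on version B (the rewrite author's own statement) =====
-- stated objective: alternative
-- what changed: B builds the explicit little-endian decimal digit list of |n| once and reads the answer off both ends of that list (top two digits reversed for the leading part, bottom two for the trailing part), instead of A's divide-down loop on the number plus a % 100.
import Mathlib
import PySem

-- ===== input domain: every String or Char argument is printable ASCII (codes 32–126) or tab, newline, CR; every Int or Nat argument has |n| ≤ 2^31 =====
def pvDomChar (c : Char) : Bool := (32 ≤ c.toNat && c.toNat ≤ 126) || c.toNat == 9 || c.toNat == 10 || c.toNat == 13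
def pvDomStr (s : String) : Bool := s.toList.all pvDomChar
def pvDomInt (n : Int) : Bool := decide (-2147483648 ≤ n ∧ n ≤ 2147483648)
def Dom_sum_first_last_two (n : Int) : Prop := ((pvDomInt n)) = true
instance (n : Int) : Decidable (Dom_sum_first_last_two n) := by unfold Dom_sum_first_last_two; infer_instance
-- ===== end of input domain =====

-- B materialises the explicit digit list of |n| once and reads both ends of it,
-- replacing A's divide-down loop on the number itself (objective: alternative).

-- ===== PORT A =====
-- the `while first_two >= 100: first_two //= 10` loop of A
def pvLoopA (x : Int) : Int :=
  if _h : 100 ≤ x then pvLoopA (PySem.Int.floordiv x 10) else x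
  termination_by x.toNat
  decreasing_by
    simp only [PySem.Int.floordiv, Int.fdiv_eq_ediv]
    omega

def sum_first_last_two (n : Int) : Int :=
  let is_negative := n < 0
  let num := if is_negative then -n else n
  let last_two := PySem.Int.mod num 100
  let first_two := pvLoopA num
  first_two + last_two

-- ===== PORT B =====
-- the `while num > 0: digits.append(num % 10); num //= 10` loop of B
def pvDigitsLoop (num : Int) (digits : List Int) : List Int :=
  if _h : 0 < num then
    pvDigitsLoop (PySem.Int.floordiv num 10) (digits ++ [PySem.Int.mod num 10])
  else digits
  termination_by num.toNat
  decreasing_by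
    simp only [PySem.Int.floordiv, Int.fdiv_eq_ediv]
    omega

def sum_first_last_two_alt (n : Int) : Int :=
  let num := if n < 0 then -n else n
  let digits0 := [PySem.Int.mod num 10]
  let num1 := PySem.Int.floordiv num 10
  let digits := pvDigitsLoop num1 digits0
  let last_two := if PySem.List.len digits = 1 then PySem.List.pyGetD digits 0 0
                  else 10 * PySem.List.pyGetD digits 1 0 + PySem.List.pyGetD digits 0 0
  let rev := digits.reverse   -- digits[::-1]
  let first_two := if PySem.List.len rev = 1 then PySem.List.pyGetD rev 0 0
                   else 10 * PySem.List.pyGetD rev 0 0 + PySem.List.pyGetD rev 1 0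
  first_two + last_two

-- ===== PRECONDITION & SPEC =====
def Spec_sum_first_last_two (n : Int) (out : Int) : Prop := out = sum_first_last_two_alt n
instance (n : Int) (out : Int) : Decidable (Spec_sum_first_last_two n out) := by unfold Spec_sum_first_last_two; infer_instance

-- ===== CLAIM =====
def Claim_equal_sum_first_last_two : Prop := ∀ (n : Int), Dom_sum_first_last_two n → Spec_sum_first_last_two n (sum_first_last_two n)

-- ===== LEMMAS AND PROOFS =====

theorem pvfdiv10 (a : Int) : PySem.Int.floordiv a 10 = a / 10 := by
  simp [PySem.Int.floordiv, Int.fdiv_eq_ediv]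

theorem pvmod_pos (a b : Int) (hb : 0 ≤ b) : PySem.Int.mod a b = a % b := by
  simp [PySem.Int.mod, Int.fmod_eq_emod, hb]

-- the digit list the loop produces, without the accumulator
def pvDList (num : Int) : List Int :=
  if _h : 0 < num then PySem.Int.mod num 10 :: pvDList (PySem.Int.floordiv num 10) else []
  termination_by num.toNat
  decreasing_by
    simp only [PySem.Int.floordiv, Int.fdiv_eq_ediv]
    omega

theorem pvDigitsLoop_eq (num : Int) (acc : List Int) :
    pvDigitsLoop num acc = acc ++ pvDList num := by
  rw [pvDigitsLoop, pvDList]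
  split_ifs with h
  · rw [pvDigitsLoop_eq]; simp
  · simp
  termination_by num.toNat
  decreasing_by
    simp only [PySem.Int.floordiv, Int.fdiv_eq_ediv]
    omega

-- the full little-endian digit list of `num` as the port builds it
def pvD (num : Int) : List Int := PySem.Int.mod num 10 :: pvDList (PySem.Int.floordiv num 10)

theorem pvD_small (num : Int) (h0 : 0 ≤ num) (h : num < 10) : pvD num = [num] := by
  unfold pvD
  rw [pvDList, pvfdiv10, pvmod_pos _ _ (by omega)]
  have : num / 10 = 0 := by omega
  simp [this]
  omega

theorem pvD_step (num : Int) (h : 10 ≤ num) :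
    pvD num = PySem.Int.mod num 10 :: pvD (num / 10) := by
  unfold pvD
  rw [pvDList, pvfdiv10]
  have h1 : 0 < num / 10 := by omega
  simp [h1]

theorem pvD_len (num : Int) : 1 ≤ (pvD num).length := by
  unfold pvD; simp

theorem pvD_len2 (num : Int) (h : 10 ≤ num) : 2 ≤ (pvD num).length := by
  rw [pvD_step num h]
  have := pvD_len (num / 10)
  simp; omega

-- indexing helpers: xs[0] and xs[1] on cons lists
theorem pvGet0 (a : Int) (l : List Int) : PySem.List.pyGetD (a :: l) 0 0 = a :=
  PySem.List.pyGetD_zero_cons a l 0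

theorem pvGet1 (a b : Int) (l : List Int) : PySem.List.pyGetD (a :: b :: l) 1 0 = b := by
  rw [show ((1 : Int)) = ((1 : Nat) : Int) by norm_num,
      PySem.List.pyGetD_ofNat _ 1 _ (by simp)]
  rfl

theorem pvLen_cons2_ne_one (a b : Int) (l : List Int) :
    ¬ PySem.List.len (a :: b :: l) = 1 := by
  simp [PySem.List.len_eq]
  omega

-- first_two as the port computes it from the reversed digit list
def pvF (num : Int) : Int :=
  if PySem.List.len (pvD num).reverse = 1 then PySem.List.pyGetD (pvD num).reverse 0 0
  else 10 * PySem.List.pyGetD (pvD num).reverse 0 0 + PySem.List.pyGetD (pvD num).reverse 1 0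

theorem pvLoopA_small (x : Int) (h : x < 100) : pvLoopA x = x := by
  rw [pvLoopA]; simp [not_le.mpr h]

theorem pvF_eq_loopA (num : Int) (h0 : 0 ≤ num) : pvF num = pvLoopA num := by
  by_cases hA : num < 10
  · unfold pvF
    rw [pvD_small num h0 hA, pvLoopA_small num (by omega)]
    simp [PySem.List.len_eq]
  · by_cases hB : num < 100
    · -- two digits: the digit list is [num % 10, num / 10]
      unfold pvF
      rw [pvD_step num (by omega), pvD_small (num / 10) (by omega) (by omega),
          pvLoopA_small num hB, pvmod_pos _ _ (by omega)]
      rw [show (num % 10 :: [num / 10]).reverse = num / 10 :: num % 10 :: [] by simp]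
      rw [if_neg (pvLen_cons2_ne_one _ _ _), pvGet0, pvGet1]
      omega
    · -- num ≥ 100: the reversed list gains a final digit; first two entries unchanged
      have hrec := pvF_eq_loopA (num / 10) (by omega)
      have hlen : 2 ≤ (pvD (num / 10)).length := pvD_len2 _ (by omega)
      unfold pvF at hrec ⊢
      rw [pvD_step num (by omega)]
      simp only [List.reverse_cons]
      obtain ⟨x, y, t, hxy⟩ : ∃ x y t, (pvD (num / 10)).reverse = x :: y :: t := by
        rcases hr : (pvD (num / 10)).reverse with _ | ⟨x, _ | ⟨y, t⟩⟩
        · exfalso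
          have h' : (pvD (num / 10)).length = 0 := by rw [← List.length_reverse, hr]; rfl
          omega
        · exfalso
          have h' : (pvD (num / 10)).length = 1 := by rw [← List.length_reverse, hr]; rfl
          omega
        · exact ⟨x, y, t, rfl⟩
      rw [hxy] at hrec ⊢
      rw [List.cons_append, List.cons_append]
      rw [if_neg (pvLen_cons2_ne_one _ _ _), pvGet0, pvGet1]
      rw [if_neg (pvLen_cons2_ne_one _ _ _), pvGet0, pvGet1] at hrec
      rw [hrec]
      conv_rhs => rw [pvLoopA]
      rw [dif_pos (show (100 : Int) ≤ num by omega), pvfdiv10]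
  termination_by num.toNat
  decreasing_by omega

-- last_two as the port computes it from the digit list
def pvG (num : Int) : Int :=
  if PySem.List.len (pvD num) = 1 then PySem.List.pyGetD (pvD num) 0 0
  else 10 * PySem.List.pyGetD (pvD num) 1 0 + PySem.List.pyGetD (pvD num) 0 0

theorem pvG_eq_mod (num : Int) (h0 : 0 ≤ num) : pvG num = PySem.Int.mod num 100 := by
  rw [pvmod_pos _ _ (by omega)]
  unfold pvG
  by_cases hA : num < 10
  · rw [pvD_small num h0 hA]
    simp [PySem.List.len_eq]
    omega
  · have hhead : ∃ t, pvD (num / 10) = PySem.Int.mod (num / 10) 10 :: t := by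
      by_cases hB : num / 10 < 10
      · refine ⟨[], ?_⟩
        rw [pvD_small (num / 10) (by omega) hB, pvmod_pos _ _ (by omega)]
        congr 1
        omega
      · exact ⟨pvD (num / 10 / 10), by rw [pvD_step (num / 10) (by omega)]⟩
    obtain ⟨t, ht⟩ := hhead
    rw [pvD_step num (by omega), ht]
    rw [if_neg (pvLen_cons2_ne_one _ _ _), pvGet0, pvGet1,
        pvmod_pos _ _ (show (0:Int) ≤ 10 by omega),
        pvmod_pos _ _ (show (0:Int) ≤ 10 by omega)]
    omega

-- ===== VERDICT =====
theorem sum_first_last_two_spec : Claim_equal_sum_first_last_two := by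
  intro n _
  unfold Spec_sum_first_last_two
  set num : Int := if n < 0 then -n else n with hnum
  have h0 : 0 ≤ num := by rw [hnum]; split_ifs <;> omega
  have hD : pvDigitsLoop (PySem.Int.floordiv num 10) [PySem.Int.mod num 10] = pvD num := by
    rw [pvDigitsLoop_eq]; rfl
  have eA : sum_first_last_two n = pvLoopA num + PySem.Int.mod num 100 := rfl
  have eB1 : sum_first_last_two_alt n =
      (if PySem.List.len (pvDigitsLoop (PySem.Int.floordiv num 10) [PySem.Int.mod num 10]).reverse = 1
        then PySem.List.pyGetD (pvDigitsLoop (PySem.Int.floordiv num 10) [PySem.Int.mod num 10]).reverse 0 0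
        else 10 * PySem.List.pyGetD (pvDigitsLoop (PySem.Int.floordiv num 10) [PySem.Int.mod num 10]).reverse 0 0
             + PySem.List.pyGetD (pvDigitsLoop (PySem.Int.floordiv num 10) [PySem.Int.mod num 10]).reverse 1 0) +
      (if PySem.List.len (pvDigitsLoop (PySem.Int.floordiv num 10) [PySem.Int.mod num 10]) = 1
        then PySem.List.pyGetD (pvDigitsLoop (PySem.Int.floordiv num 10) [PySem.Int.mod num 10]) 0 0
        else 10 * PySem.List.pyGetD (pvDigitsLoop (PySem.Int.floordiv num 10) [PySem.Int.mod num 10]) 1 0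
             + PySem.List.pyGetD (pvDigitsLoop (PySem.Int.floordiv num 10) [PySem.Int.mod num 10]) 0 0) := rfl
  rw [hD] at eB1
  have eB : sum_first_last_two_alt n = pvF num + pvG num := eB1
  rw [eA, eB, pvF_eq_loopA num h0, pvG_eq_mod num h0]
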